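-- pv_equiv track=rewrite | github.com/junjange/uttug-seuja-algorithm | 이건희/level2/스킬트리.py | solution
-- ===== SOURCE A (Python) =====
-- def solution(skill, skill_trees):
--     result = 0
--
--     for i in skill_trees:
--         order = ''
--
--         for j in i:
--             if j in skill:
--                 order += j
--
--         if order == skill[:len(order)]:
--             result += 1
--
--     return result
-- ===== SOURCE B (Python) =====
-- def solution(skill, skill_trees):
--     count = 0
--     for tree in skill_trees:
--         idx = 0
--         ok = True
--         for ch in tree:
--             if ch in skill:
--                 if idx < len(skill) and ch == skill[idx]:
--                     idx += 1
--                 else: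
--                     ok = False
--                     break
--         if ok:
--             count += 1
--     return count
-- ===== Notes on version B (the rewrite author's own statement) =====
-- stated objective: faster
-- what changed: B scans each tree once with an integer pointer into skill and exits early on the first mismatch, instead of accumulating a filtered string and comparing it to a slice of skill.
import Mathlib
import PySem

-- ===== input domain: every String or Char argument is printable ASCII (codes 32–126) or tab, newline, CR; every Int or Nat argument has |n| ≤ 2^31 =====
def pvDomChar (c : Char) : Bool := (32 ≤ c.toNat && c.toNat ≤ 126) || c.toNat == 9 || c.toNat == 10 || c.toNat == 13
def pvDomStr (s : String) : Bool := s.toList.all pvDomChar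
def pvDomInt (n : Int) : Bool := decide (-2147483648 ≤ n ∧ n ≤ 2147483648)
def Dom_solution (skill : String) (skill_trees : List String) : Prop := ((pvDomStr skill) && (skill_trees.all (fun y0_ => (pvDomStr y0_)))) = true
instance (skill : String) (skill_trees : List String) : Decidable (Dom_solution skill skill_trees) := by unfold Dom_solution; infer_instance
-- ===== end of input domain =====

-- B replaces A's build-filtered-string-then-compare-with-slice check by a single scan
-- with an index pointer into skill and an early exit (objective: simpler decomposition).

-- ===== PORT A =====
-- `j in skill` for a single character j is substring membership of the 1-char string.
def solution (skill : String) (skill_trees : List String) : Int :=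
  skill_trees.foldl (fun result i =>
    let order := i.toList.foldl (fun order j =>
      if PySem.Chars.isIn [j] skill.toList then order ++ [j] else order) ([] : List Char)
    if order = PySem.List.slice skill.toList none (some (order.length : Int))
    then result + 1 else result) 0

-- ===== PORT B =====
-- `idx < len(skill) and ch == skill[idx]` is exactly `sk[idx]? == some ch` (out of range gives none).
def scanTree (sk : List Char) (cs : List Char) (idx : Nat) : Bool :=
  match cs with
  | [] => true
  | c :: rest =>
    if PySem.Chars.isIn [c] sk then
      if sk[idx]? == some c then scanTree sk rest (idx + 1) else false
    else scanTree sk rest idx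

def solution_alt (skill : String) (skill_trees : List String) : Int :=
  skill_trees.foldl (fun count tree =>
    if scanTree skill.toList tree.toList 0 then count + 1 else count) 0

-- ===== PRECONDITION & SPEC =====
def Spec_solution (skill : String) (skill_trees : List String) (out : Int) : Prop := out = solution_alt skill skill_trees
instance (skill : String) (skill_trees : List String) (out : Int) : Decidable (Spec_solution skill skill_trees out) := by unfold Spec_solution; infer_instance

-- ===== CLAIM (what is proved, stated in full; the proofs are below) =====
def Claim_equal_solution : Prop := ∀ (skill : String) (skill_trees : List String), Dom_solution skill skill_trees → Spec_solution skill skill_trees (solution skill skill_trees)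

-- ===== LEMMAS AND PROOFS =====

-- B's pointer scan accepts exactly when the filtered characters form a prefix of sk past idx.
lemma scanTree_iff (sk : List Char) (cs : List Char) (idx : Nat) :
    scanTree sk cs idx = true ↔
      cs.filter (fun c => PySem.Chars.isIn [c] sk) <+: sk.drop idx := by
  induction cs generalizing idx with
  | nil => simp [scanTree]
  | cons c rest ih =>
    by_cases hp : PySem.Chars.isIn [c] sk
    · rw [scanTree]
      simp only [hp, if_true, List.filter_cons]
      by_cases hg : sk[idx]? = some c
      · have hlt : idx < sk.length := by
          by_contra h
          rw [List.getElem?_eq_none (by omega)] at hg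
          cases hg
        have hdrop : sk.drop idx = c :: sk.drop (idx + 1) := by
          rw [List.drop_eq_getElem_cons hlt]
          have : sk[idx] = c := (List.getElem?_eq_some_iff.mp hg).choose_spec
          rw [this]
        rw [hdrop]
        simp only [hg, BEq.rfl, if_true, List.cons_prefix_cons, true_and]
        exact ih (idx + 1)
      · have : (sk[idx]? == some c) = false := by
          simp [hg]
        rw [this]
        simp only [Bool.false_eq_true, if_false]
        constructor
        · intro h; exact absurd h (by simp)
        · intro h
          obtain ⟨t, ht⟩ := h
          have : sk[idx]? = some c := by
            have h0 : (sk.drop idx)[0]? = some c := by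
              rw [← ht]; simp
            simpa using h0
          exact hg this
    · rw [scanTree]
      simp only [hp, List.filter_cons]
      simpa [hp] using ih idx

-- per-tree: A's condition equals B's condition
lemma tree_cond_eq (sk t : List Char) :
    (t.foldl (fun order j =>
        if PySem.Chars.isIn [j] sk then order ++ [j] else order) ([] : List Char)
      = PySem.List.slice sk none
          (some (((t.foldl (fun order j =>
              if PySem.Chars.isIn [j] sk then order ++ [j] else order)
              ([] : List Char)).length : Int))))
    ↔ scanTree sk t 0 = true := by
  have hfold : t.foldl (fun order j =>
      if PySem.Chars.isIn [j] sk then order ++ [j] else order) ([] : List Char)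
      = t.filter (fun c => PySem.Chars.isIn [c] sk) := by
    simpa using PySem.List.foldl_append_if_eq_filter
      (p := fun c => PySem.Chars.isIn [c] sk) (l := t) (acc := ([] : List Char))
  rw [hfold, PySem.List.slice_to_natCast, scanTree_iff, List.drop_zero]
  exact (List.prefix_iff_eq_take).symm

-- ===== VERDICT (by name: the statement is the Claim_ definition above) =====
theorem solution_spec : Claim_equal_solution := by
  intro skill skill_trees _
  unfold Spec_solution solution solution_alt
  congr 1
  funext result i
  simp only []
  by_cases h : scanTree skill.toList i.toList 0 = true
  · rw [if_pos ((tree_cond_eq skill.toList i.toList).mpr h), if_pos h]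
  · rw [if_neg (fun hc => h ((tree_cond_eq skill.toList i.toList).mp hc)),
        if_neg (by simpa using h)]
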